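-- pv_equiv track=rewrite | github.com/pjoshi08/DSA | src/main/java/org/example/dp1d/CountTeams.py | numTeams3
-- ===== SOURCE A (Python) =====
-- from typing import List
--
-- def numTeams3(rating: List[int]) -> int:
--     length = len(rating)
--     ascend = [[0] * 4 for _ in range(length)]
--     descend = [[0] * 4 for _ in range(length)]
--
--     for i in range(length):  # for group len 1, we mark them as 1
--         ascend[i][1] = 1
--         descend[i][1] = 1
--
--     for count in range(2, 4):  # calculate for group len 2 and 3
--         for i in range(length):
--             for j in range(i + 1, length):
--                 if rating[i] < rating[j]:  # ascend condition
--                     ascend[i][count] += ascend[j][count - 1]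
--                 if rating[i] > rating[j]:  # descend
--                     descend[i][count] += descend[j][count - 1]
--
--     res = 0
--     for i in range(length):
--         res += ascend[i][3] + descend[i][3]
--     return res
-- ===== SOURCE B (Python) =====
-- def numTeams3(rating):
--     # Count, for each middle soldier j, smaller/greater soldiers on each side.
--     n = len(rating)
--     res = 0
--     for j in range(n):
--         less_left = sum(1 for i in range(j) if rating[i] < rating[j])
--         greater_left = sum(1 for i in range(j) if rating[i] > rating[j])
--         less_right = sum(1 for k in range(j + 1, n) if rating[k] < rating[j])
--         greater_right = sum(1 for k in range(j + 1, n) if rating[k] > rating[j])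
--         res += less_left * greater_right + greater_left * less_right
--     return res
-- ===== Notes on version B (the rewrite author's own statement) =====
-- stated objective: simpler
-- what changed: Replaces A's two length-2/length-3 DP tables (built by a triple nested loop with in-place updates) by a single pass over each middle element j, multiplying the count of smaller/greater elements left of j with the count of greater/smaller elements right of j.
import Mathlib
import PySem

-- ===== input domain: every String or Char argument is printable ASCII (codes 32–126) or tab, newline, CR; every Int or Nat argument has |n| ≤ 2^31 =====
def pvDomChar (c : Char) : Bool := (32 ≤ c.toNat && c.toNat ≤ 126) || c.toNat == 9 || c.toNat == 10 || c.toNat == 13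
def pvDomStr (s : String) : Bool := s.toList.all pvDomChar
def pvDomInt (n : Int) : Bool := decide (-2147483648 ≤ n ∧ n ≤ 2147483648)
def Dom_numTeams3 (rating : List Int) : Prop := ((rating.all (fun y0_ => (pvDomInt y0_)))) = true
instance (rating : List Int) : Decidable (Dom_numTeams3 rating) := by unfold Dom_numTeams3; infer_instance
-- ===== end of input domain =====

-- B counts, for each middle element, smaller/greater partners on each side (one formula pass)
-- instead of A's length-2/length-3 dynamic-programming tables; objective: simpler.

-- ===== PORT A =====
-- ascend[i][count] += v  (the Python in-place update on the 2-D table)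
def pvBump (a : List (List Int)) (i c : Nat) (v : Int) : List (List Int) :=
  a.set i ((a.getD i []).set c ((a.getD i []).getD c 0 + v))

def numTeams3 (rating : List Int) : Int :=
  let length := rating.length
  let ascend := List.replicate length (List.replicate 4 (0 : Int))
  let descend := List.replicate length (List.replicate 4 (0 : Int))
  -- for i in range(length): ascend[i][1] = 1; descend[i][1] = 1
  let init := (List.range length).foldl
    (fun (p : List (List Int) × List (List Int)) i =>
      (p.1.set i ((p.1.getD i []).set 1 1), p.2.set i ((p.2.getD i []).set 1 1)))
    (ascend, descend)
  -- for count in range(2, 4): for i in range(length): for j in range(i+1, length): …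
  let tables := [2, 3].foldl
    (fun (p : List (List Int) × List (List Int)) count =>
      (List.range length).foldl
        (fun (p : List (List Int) × List (List Int)) i =>
          (List.range' (i + 1) (length - (i + 1))).foldl
            (fun (p : List (List Int) × List (List Int)) j =>
              ((if rating.getD i 0 < rating.getD j 0 then
                  pvBump p.1 i count ((p.1.getD j []).getD (count - 1) 0) else p.1),
               (if rating.getD i 0 > rating.getD j 0 then
                  pvBump p.2 i count ((p.2.getD j []).getD (count - 1) 0) else p.2)))
            p)
        p)
    init
  -- res = sum of ascend[i][3] + descend[i][3]
  (List.range length).foldl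
    (fun res i => res + (tables.1.getD i []).getD 3 0 + (tables.2.getD i []).getD 3 0) 0

-- ===== PORT B =====
def numTeams3_alt (rating : List Int) : Int :=
  let n := rating.length
  (List.range n).foldl
    (fun res j =>
      let lessLeft : Int := (((List.range j).filter
        (fun i => rating.getD i 0 < rating.getD j 0)).length : Int)
      let greaterLeft : Int := (((List.range j).filter
        (fun i => rating.getD i 0 > rating.getD j 0)).length : Int)
      let lessRight : Int := (((List.range' (j + 1) (n - (j + 1))).filter
        (fun k => rating.getD k 0 < rating.getD j 0)).length : Int)
      let greaterRight : Int := (((List.range' (j + 1) (n - (j + 1))).filter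
        (fun k => rating.getD k 0 > rating.getD j 0)).length : Int)
      res + lessLeft * greaterRight + greaterLeft * lessRight)
    0

-- ===== PRECONDITION & SPEC =====
def Spec_numTeams3 (rating : List Int) (out : Int) : Prop := out = numTeams3_alt rating
instance (rating : List Int) (out : Int) : Decidable (Spec_numTeams3 rating out) := by unfold Spec_numTeams3; infer_instance

-- ===== CLAIM (what is proved, stated in full; the proofs are below) =====
def Claim_equal_numTeams3 : Prop := ∀ (rating : List Int), Dom_numTeams3 rating → Spec_numTeams3 rating (numTeams3 rating)

-- ===== LEMMAS AND PROOFS =====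

-- R i < R j / R i > R j abstracted as a decidable comparison cmp on the ratings
def pvCnt (R : Nat → Int) (cmp : Int → Int → Prop) [DecidableRel cmp] (j n : Nat) : Int :=
  ∑ k ∈ Finset.Ico (j + 1) n, (if cmp (R j) (R k) then (1 : Int) else 0)
def pvS2 (R : Nat → Int) (cmp : Int → Int → Prop) [DecidableRel cmp] (i n : Nat) : Int :=
  ∑ j ∈ Finset.Ico (i + 1) n, (if cmp (R i) (R j) then pvCnt R cmp j n else 0)

-- the inner j-loop and the i-loop of port A, for one of the two tables
def pvInner (R : Nat → Int) (cmp : Int → Int → Prop) [DecidableRel cmp] (cnt n i : Nat)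
    (a : List (List Int)) : List (List Int) :=
  (List.range' (i + 1) (n - (i + 1))).foldl
    (fun a j => if cmp (R i) (R j) then pvBump a i cnt ((a.getD j []).getD (cnt - 1) 0) else a) a

def pvLoop (R : Nat → Int) (cmp : Int → Int → Prop) [DecidableRel cmp] (cnt n : Nat)
    (a : List (List Int)) : List (List Int) :=
  (List.range n).foldl (fun a i => pvInner R cmp cnt n i a) a

lemma foldl_prod {α β γ : Type} (f : α → γ → α) (g : β → γ → β) (l : List γ) :
    ∀ (p : α × β), l.foldl (fun p x => (f p.1 x, g p.2 x)) p = (l.foldl f p.1, l.foldl g p.2) := by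
  induction l with
  | nil => intro p; simp
  | cons x xs ih => intro p; simp [List.foldl_cons, ih]

lemma set_getD_self {α : Type} (l : List α) (c : Nat) (d : α) (h : c < l.length) :
    l.set c (l.getD c d) = l := by
  simp [List.getD, List.getElem?_eq_getElem h]

lemma getD_set_self {α : Type} (l : List α) (i : Nat) (v d : α) (h : i < l.length) :
    (l.set i v).getD i d = v := by
  simp [List.getD, List.getElem?_set_self h]

lemma bump_length (a : List (List Int)) (i c : Nat) (v : Int) :
    (pvBump a i c v).length = a.length := by simp [pvBump]

lemma bump_getD_other (a : List (List Int)) (i c : Nat) (v : Int) (j : Nat) (h : j ≠ i) :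
    (pvBump a i c v).getD j [] = a.getD j [] := by
  simp [pvBump, List.getD]
  rw [List.getElem?_set_ne (by omega)]

lemma bump_getD_self (a : List (List Int)) (i c : Nat) (v : Int) (h : i < a.length) :
    (pvBump a i c v).getD i [] = (a.getD i []).set c ((a.getD i []).getD c 0 + v) := by
  simp [pvBump, List.getD, List.getElem?_set_self (by simpa using h)]

lemma bump_zero (a : List (List Int)) (i c : Nat) (hi : i < a.length)
    (hc : c < (a.getD i []).length) : pvBump a i c 0 = a := by
  unfold pvBump
  rw [add_zero, set_getD_self _ _ _ hc, set_getD_self _ _ _ hi]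

lemma bump_bump (a : List (List Int)) (i c : Nat) (v w : Int) (hi : i < a.length)
    (hc : c < (a.getD i []).length) :
    pvBump (pvBump a i c v) i c w = pvBump a i c (v + w) := by
  unfold pvBump
  rw [getD_set_self _ _ _ _ hi, List.set_set, List.set_set,
      getD_set_self _ _ _ _ hc, add_assoc]

-- inner j-loop = a single bump by the accumulated sum (all updates hit cell (i,cnt))
lemma inner_spec (cmp : Nat → Nat → Prop) [DecidableRel cmp] (cnt rd : Nat) (i : Nat)
    (js : List Nat) (a : List (List Int)) (hji : ∀ j ∈ js, j ≠ i)
    (hi : i < a.length) (hc : cnt < (a.getD i []).length) :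
    js.foldl (fun a j => if cmp i j then pvBump a i cnt ((a.getD j []).getD rd 0) else a) a
      = pvBump a i cnt
          ((js.map (fun j => if cmp i j then (a.getD j []).getD rd 0 else 0)).sum) := by
  induction js generalizing a with
  | nil => simp [bump_zero _ _ _ hi hc]
  | cons j js ih =>
    have hj : j ≠ i := hji j (by simp)
    have hji' : ∀ x ∈ js, x ≠ i := fun x hx => hji x (by simp [hx])
    by_cases h : cmp i j
    · simp only [List.foldl_cons, if_pos h]
      have hi' : i < (pvBump a i cnt ((a.getD j []).getD rd 0)).length := by
        rw [bump_length]; exact hi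
      have hc' : cnt < ((pvBump a i cnt ((a.getD j []).getD rd 0)).getD i []).length := by
        rw [bump_getD_self _ _ _ _ hi, List.length_set]; exact hc
      rw [ih _ hji' hi' hc']
      have hmap : (js.map fun j' =>
            if cmp i j' then ((pvBump a i cnt ((a.getD j []).getD rd 0)).getD j' []).getD rd 0 else 0)
          = js.map fun j' => if cmp i j' then (a.getD j' []).getD rd 0 else 0 := by
        apply List.map_congr_left; intro x hx
        rw [bump_getD_other _ _ _ _ _ (hji' x hx)]
      rw [hmap, bump_bump _ _ _ _ _ hi hc]
      simp [h]
    · simp only [List.foldl_cons, if_neg h]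
      rw [ih _ hji' hi hc]
      simp [h]

lemma sum_list_range {M : Type} [AddCommMonoid M] (f : Nat → M) (n : Nat) :
    ((List.range n).map f).sum = ∑ i ∈ Finset.range n, f i := by
  induction n with
  | zero => simp
  | succ n ih => simp [List.range_succ, Finset.sum_range_succ, ih]

lemma sum_list_range' {M : Type} [AddCommMonoid M] (f : Nat → M) (a b : Nat) :
    ((List.range' a b).map f).sum = ∑ i ∈ Finset.Ico a (a + b), f i := by
  rw [List.range'_eq_map_range, List.map_map, sum_list_range, Finset.sum_Ico_eq_sum_range]
  simp [Function.comp]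

lemma filter_length_sum {α : Type} (p : α → Bool) (l : List α) :
    ((l.filter p).length : Int) = (l.map (fun x => if p x then (1 : Int) else 0)).sum := by
  induction l with
  | nil => simp
  | cons x xs ih => by_cases h : p x <;> simp [h, ih] <;> push_cast <;> ring

-- the i-loop for a given column cnt, characterised row by row
-- rows0 : what un-updated rows look like; rows1 : updated rows
lemma loop_fold_spec (R : Nat → Int) (cmp : Int → Int → Prop) [DecidableRel cmp]
    (cnt n : Nat)
    (rows0 rows1 : Nat → List Int)
    (hlen0 : ∀ k, (rows0 k).length = 4) (hcnt : cnt < 4)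
    (hupd : ∀ i, i < n → rows1 i
        = (rows0 i).set cnt ((rows0 i).getD cnt 0
            + ∑ j ∈ Finset.Ico (i + 1) n,
                (if cmp (R i) (R j) then (rows0 j).getD (cnt - 1) 0 else 0)))
    (a : List (List Int)) (hlen : a.length = n)
    (hrows : ∀ k, a.getD k [] = if k < n then rows0 k else []) :
    ∀ m, m ≤ n →
      ((List.range m).foldl (fun a i => pvInner R cmp cnt n i a) a).length = n ∧
      ∀ k, ((List.range m).foldl (fun a i => pvInner R cmp cnt n i a) a).getD k []
          = if k < m then rows1 k else if k < n then rows0 k else [] := by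
  intro m
  induction m with
  | zero =>
    intro _
    constructor
    · simpa using hlen
    · intro k; simpa [Nat.not_lt_zero] using hrows k
  | succ m ih =>
    intro hm
    obtain ⟨ihlen, ihrows⟩ := ih (by omega)
    set A := (List.range m).foldl (fun a i => pvInner R cmp cnt n i a) a with hA
    have hstep : (List.range (m + 1)).foldl (fun a i => pvInner R cmp cnt n i a) a
        = pvInner R cmp cnt n m A := by
      rw [List.range_succ, List.foldl_append, List.foldl_cons, List.foldl_nil]
    have hmrow : A.getD m [] = rows0 m := by
      rw [ihrows m, if_neg (by omega), if_pos (by omega)]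
    have hmlt : m < A.length := by omega
    have hclen : cnt < (A.getD m []).length := by rw [hmrow, hlen0]; exact hcnt
    have hinner : pvInner R cmp cnt n m A
        = pvBump A m cnt (((List.range' (m + 1) (n - (m + 1))).map
            (fun j => if cmp (R m) (R j) then (A.getD j []).getD (cnt - 1) 0 else 0)).sum) := by
      unfold pvInner
      refine inner_spec (fun i j => cmp (R i) (R j)) cnt (cnt - 1) m _ A
        (fun j hj => ?_) hmlt hclen
      have h := List.mem_range'_1.mp hj
      omega
    have hsum : ((List.range' (m + 1) (n - (m + 1))).map
          (fun j => if cmp (R m) (R j) then (A.getD j []).getD (cnt - 1) 0 else 0)).sum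
        = ∑ j ∈ Finset.Ico (m + 1) n,
            (if cmp (R m) (R j) then (rows0 j).getD (cnt - 1) 0 else 0) := by
      rw [sum_list_range']
      have hn : m + 1 + (n - (m + 1)) = n := by omega
      rw [hn]
      apply Finset.sum_congr rfl
      intro j hj
      rw [Finset.mem_Ico] at hj
      have hAj : A.getD j [] = rows0 j := by
        rw [ihrows j, if_neg (by omega), if_pos (by omega)]
      rw [hAj]
    rw [hstep, hinner, hsum]
    constructor
    · rw [bump_length]; exact ihlen
    · intro k
      by_cases hk : k = m
      · subst hk
        rw [bump_getD_self _ _ _ _ hmlt, hmrow, if_pos (by omega), hupd k (by omega)]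
      · rw [bump_getD_other _ _ _ _ _ hk, ihrows k]
        by_cases h1 : k < m
        · rw [if_pos h1, if_pos (show k < m + 1 by omega)]
        · rw [if_neg h1, if_neg (show ¬ k < m + 1 by omega)]

-- the initial marking loop: every row becomes [0, 1, 0, 0]
lemma init_spec (n : Nat) :
    ∀ (a : List (List Int)), a.length = n → (∀ k, k < n → a.getD k [] = List.replicate 4 0) →
    ∀ m, m ≤ n →
      ((List.range m).foldl (fun a i => a.set i ((a.getD i []).set 1 1)) a).length = n ∧
      ∀ k, ((List.range m).foldl (fun a i => a.set i ((a.getD i []).set 1 1)) a).getD k []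
          = if k < m then [0, 1, 0, 0] else if k < n then List.replicate 4 0 else [] := by
  intro a hlen hrows m
  induction m with
  | zero =>
    intro _
    refine ⟨hlen, fun k => ?_⟩
    simp only [List.range_zero, List.foldl_nil, Nat.not_lt_zero, if_false]
    by_cases hk : k < n
    · rw [if_pos hk, hrows k hk]
    · rw [if_neg hk, List.getD_eq_default]
      omega
  | succ m ih =>
    intro hm
    obtain ⟨ihlen, ihrows⟩ := ih (by omega)
    set A := (List.range m).foldl (fun a i => a.set i ((a.getD i []).set 1 1)) a with hA
    have hstep : (List.range (m + 1)).foldl (fun a i => a.set i ((a.getD i []).set 1 1)) a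
        = A.set m ((A.getD m []).set 1 1) := by
      rw [List.range_succ, List.foldl_append, List.foldl_cons, List.foldl_nil]
    have hmrow : A.getD m [] = List.replicate 4 0 := by
      rw [ihrows m, if_neg (by omega), if_pos (by omega)]
    refine ⟨by rw [hstep, List.length_set]; exact ihlen, fun k => ?_⟩
    rw [hstep]
    by_cases hk : k = m
    · subst hk
      rw [getD_set_self _ _ _ _ (by omega), hmrow, if_pos (by omega)]
      decide
    · rw [show (A.set m ((A.getD m []).set 1 1)).getD k [] = A.getD k [] by
          simp only [List.getD]
          rw [List.getElem?_set_ne (by omega)], ihrows k]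
      by_cases h1 : k < m
      · rw [if_pos h1, if_pos (show k < m + 1 by omega)]
      · rw [if_neg h1, if_neg (show ¬ k < m + 1 by omega)]

-- triangular double-sum swap
lemma tri_swap (n : Nat) (f : Nat → Nat → Int) :
    ∑ i ∈ Finset.range n, ∑ j ∈ Finset.Ico (i + 1) n, f i j
      = ∑ j ∈ Finset.range n, ∑ i ∈ Finset.range j, f i j := by
  have h1 : ∀ i ∈ Finset.range n, ∑ j ∈ Finset.Ico (i + 1) n, f i j
      = ∑ j ∈ Finset.range n, (if i < j then f i j else 0) := by
    intro i hi
    have hsub : Finset.Ico (i + 1) n ⊆ Finset.range n := by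
      intro x hx
      simp only [Finset.mem_Ico] at hx
      exact Finset.mem_range.mpr hx.2
    rw [← Finset.sum_subset hsub (fun x hx hnx => ?_)]
    · exact Finset.sum_congr rfl fun x hx => by
        rw [if_pos (by simpa using (Finset.mem_Ico.mp hx).1)]
    · rw [if_neg]
      simp only [Finset.mem_range] at hx
      simp only [Finset.mem_Ico, not_and, not_lt] at hnx
      omega
  have h2 : ∀ j ∈ Finset.range n, ∑ i ∈ Finset.range n, (if i < j then f i j else 0)
      = ∑ i ∈ Finset.range j, f i j := by
    intro j hj
    have hsub : Finset.range j ⊆ Finset.range n := by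
      intro x hx
      simp only [Finset.mem_range] at hx hj ⊢
      omega
    rw [← Finset.sum_subset hsub (fun x hx hnx => ?_)]
    · exact Finset.sum_congr rfl fun x hx => by rw [if_pos (Finset.mem_range.mp hx)]
    · rw [if_neg]
      simp only [Finset.mem_range, not_lt] at hnx
      omega
  rw [Finset.sum_congr rfl h1, Finset.sum_comm, Finset.sum_congr rfl h2]

-- one comparison direction of the final identity
lemma half_sum (R : Nat → Int) (cmp : Int → Int → Prop) [DecidableRel cmp] (n : Nat) :
    ∑ i ∈ Finset.range n, pvS2 R cmp i n
      = ∑ j ∈ Finset.range n,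
          (∑ i ∈ Finset.range j, (if cmp (R i) (R j) then (1 : Int) else 0)) * pvCnt R cmp j n := by
  unfold pvS2
  rw [tri_swap n (fun i j => if cmp (R i) (R j) then pvCnt R cmp j n else 0)]
  apply Finset.sum_congr rfl
  intro j hj
  rw [Finset.sum_mul]
  apply Finset.sum_congr rfl
  intro i hi
  by_cases h : cmp (R i) (R j) <;> simp [h]


-- the port's simultaneous (ascend, descend) folds split into two independent folds
lemma split_init (n : Nat) :
    ∀ (p : List (List Int) × List (List Int)),
    (List.range n).foldl (fun p i =>
        (p.1.set i ((p.1.getD i []).set 1 1), p.2.set i ((p.2.getD i []).set 1 1))) p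
      = ((List.range n).foldl (fun a i => a.set i ((a.getD i []).set 1 1)) p.1,
         (List.range n).foldl (fun a i => a.set i ((a.getD i []).set 1 1)) p.2) :=
  foldl_prod (fun (a : List (List Int)) i => a.set i ((a.getD i []).set 1 1))
    (fun (a : List (List Int)) i => a.set i ((a.getD i []).set 1 1)) (List.range n)

lemma split_inner (rt : List Int) (cnt n i : Nat) :
    ∀ (p : List (List Int) × List (List Int)),
    (List.range' (i + 1) (n - (i + 1))).foldl (fun p j =>
        ((if rt.getD i 0 < rt.getD j 0 then
            pvBump p.1 i cnt ((p.1.getD j []).getD (cnt - 1) 0) else p.1),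
         (if rt.getD i 0 > rt.getD j 0 then
            pvBump p.2 i cnt ((p.2.getD j []).getD (cnt - 1) 0) else p.2))) p
      = (pvInner (fun k => rt.getD k 0) (· < ·) cnt n i p.1,
         pvInner (fun k => rt.getD k 0) (· > ·) cnt n i p.2) := by
  intro p
  unfold pvInner
  exact foldl_prod
    (fun (a : List (List Int)) j => if rt.getD i 0 < rt.getD j 0 then pvBump a i cnt ((a.getD j []).getD (cnt - 1) 0) else a)
    (fun (a : List (List Int)) j => if rt.getD i 0 > rt.getD j 0 then pvBump a i cnt ((a.getD j []).getD (cnt - 1) 0) else a)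
    (List.range' (i + 1) (n - (i + 1))) p

lemma split_iloop (rt : List Int) (cnt n : Nat) :
    ∀ (p : List (List Int) × List (List Int)),
    (List.range n).foldl (fun p i =>
        (List.range' (i + 1) (n - (i + 1))).foldl (fun p j =>
          ((if rt.getD i 0 < rt.getD j 0 then
              pvBump p.1 i cnt ((p.1.getD j []).getD (cnt - 1) 0) else p.1),
           (if rt.getD i 0 > rt.getD j 0 then
              pvBump p.2 i cnt ((p.2.getD j []).getD (cnt - 1) 0) else p.2))) p) p
      = ((List.range n).foldl (fun a i => pvInner (fun k => rt.getD k 0) (· < ·) cnt n i a) p.1,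
         (List.range n).foldl (fun a i => pvInner (fun k => rt.getD k 0) (· > ·) cnt n i a) p.2) := by
  have h : (fun (p : List (List Int) × List (List Int)) (i : Nat) =>
      (List.range' (i + 1) (n - (i + 1))).foldl (fun p j =>
        ((if rt.getD i 0 < rt.getD j 0 then
            pvBump p.1 i cnt ((p.1.getD j []).getD (cnt - 1) 0) else p.1),
         (if rt.getD i 0 > rt.getD j 0 then
            pvBump p.2 i cnt ((p.2.getD j []).getD (cnt - 1) 0) else p.2))) p)
      = fun p i => (pvInner (fun k => rt.getD k 0) (· < ·) cnt n i p.1,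
                    pvInner (fun k => rt.getD k 0) (· > ·) cnt n i p.2) := by
    funext p i
    exact split_inner rt cnt n i p
  rw [h]
  exact foldl_prod
    (fun a i => pvInner (fun k => rt.getD k 0) (· < ·) cnt n i a)
    (fun a i => pvInner (fun k => rt.getD k 0) (· > ·) cnt n i a) (List.range n)

lemma foldl_add2_eq (f g : Nat → Int) (l : List Nat) :
    ∀ b : Int, l.foldl (fun r x => r + f x + g x) b = b + (l.map (fun x => f x + g x)).sum := by
  induction l with
  | nil => intro b; simp
  | cons x xs ih => intro b; simp [List.foldl_cons, ih]; ring

theorem numTeams3_eq (rating : List Int) : numTeams3 rating = numTeams3_alt rating := by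
  simp only [numTeams3]
  rw [split_init rating.length]
  simp only [List.foldl_cons, List.foldl_nil]
  rw [split_iloop rating 2 rating.length, split_iloop rating 3 rating.length]
  set n := rating.length with hn
  set R : Nat → Int := fun k => rating.getD k 0 with hRdef
  set A1 := (List.range n).foldl (fun a i => a.set i ((a.getD i []).set 1 1))
      (List.replicate n (List.replicate 4 (0 : Int))) with hA1
  set A2 := (List.range n).foldl (fun a i => pvInner R (· < ·) 2 n i a) A1 with hA2
  set D2 := (List.range n).foldl (fun a i => pvInner R (· > ·) 2 n i a) A1 with hD2
  set A3 := (List.range n).foldl (fun a i => pvInner R (· < ·) 3 n i a) A2 with hA3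
  set D3 := (List.range n).foldl (fun a i => pvInner R (· > ·) 3 n i a) D2 with hD3
  have hinit := init_spec n (List.replicate n (List.replicate 4 (0 : Int))) (by simp)
    (fun k hk => by simp [List.getD, hk]) n le_rfl
  rw [← hA1] at hinit
  have hrowsA1 : ∀ k, A1.getD k [] = if k < n then [0, 1, 0, 0] else [] := by
    intro k; rw [hinit.2 k]; by_cases hk : k < n <;> simp [hk]
  have h2lt := loop_fold_spec R (· < ·) 2 n (fun _ => [0, 1, 0, 0])
    (fun i => [0, 1, pvCnt R (· < ·) i n, 0]) (fun k => rfl) (by omega)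
    (fun i hi => by simp [pvCnt]) A1 hinit.1 hrowsA1 n le_rfl
  rw [← hA2] at h2lt
  have h2gt := loop_fold_spec R (· > ·) 2 n (fun _ => [0, 1, 0, 0])
    (fun i => [0, 1, pvCnt R (· > ·) i n, 0]) (fun k => rfl) (by omega)
    (fun i hi => by simp [pvCnt]) A1 hinit.1 hrowsA1 n le_rfl
  rw [← hD2] at h2gt
  have hrowsA2 : ∀ k, A2.getD k [] = if k < n then [0, 1, pvCnt R (· < ·) k n, 0] else [] := by
    intro k; rw [h2lt.2 k]; by_cases hk : k < n <;> simp [hk]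
  have hrowsD2 : ∀ k, D2.getD k [] = if k < n then [0, 1, pvCnt R (· > ·) k n, 0] else [] := by
    intro k; rw [h2gt.2 k]; by_cases hk : k < n <;> simp [hk]
  have h3lt := loop_fold_spec R (· < ·) 3 n (fun i => [0, 1, pvCnt R (· < ·) i n, 0])
    (fun i => [0, 1, pvCnt R (· < ·) i n, pvS2 R (· < ·) i n]) (fun k => rfl) (by omega)
    (fun i hi => by simp [pvS2]) A2 h2lt.1 hrowsA2 n le_rfl
  rw [← hA3] at h3lt
  have h3gt := loop_fold_spec R (· > ·) 3 n (fun i => [0, 1, pvCnt R (· > ·) i n, 0])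
    (fun i => [0, 1, pvCnt R (· > ·) i n, pvS2 R (· > ·) i n]) (fun k => rfl) (by omega)
    (fun i hi => by simp [pvS2]) D2 h2gt.1 hrowsD2 n le_rfl
  rw [← hD3] at h3gt
  have hterm : ∀ i ∈ Finset.range n,
      (A3.getD i []).getD 3 0 + (D3.getD i []).getD 3 0
        = pvS2 R (· < ·) i n + pvS2 R (· > ·) i n := by
    intro i hi
    rw [Finset.mem_range] at hi
    rw [h3lt.2 i, if_pos hi, h3gt.2 i, if_pos hi]
    simp [List.getD]
  rw [foldl_add2_eq, zero_add, sum_list_range, Finset.sum_congr rfl hterm]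
  -- B side
  simp only [numTeams3_alt]
  rw [foldl_add2_eq, zero_add, sum_list_range]
  rw [Finset.sum_add_distrib, half_sum R (· < ·) n, half_sum R (· > ·) n,
      ← Finset.sum_add_distrib]
  refine Finset.sum_congr rfl ?_
  intro j hj
  rw [Finset.mem_range] at hj
  rw [filter_length_sum, filter_length_sum, filter_length_sum, filter_length_sum,
      sum_list_range, sum_list_range, sum_list_range', sum_list_range',
      show j + 1 + (n - (j + 1)) = n by omega]
  simp [pvCnt, gt_iff_lt, hRdef, List.getD]

-- ===== VERDICT (by name: the statement is the Claim_ definition above) =====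
theorem numTeams3_spec : Claim_equal_numTeams3 := by
  intro rating _
  unfold Spec_numTeams3
  exact numTeams3_eq rating
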